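-- pv_equiv track=rewrite | github.com/cecilia-uu/LeetCode | google/score_points.py | scorePoints
-- ===== SOURCE A (Python) =====
-- def scorePoints(points, tokens: str) -> int:
--     res = 0 if tokens[0] == "E" else points[0]
--     n = len(points)
--
--     for i in range(1, n):
--         if tokens[i] == "T":
--             res += points[i]
--         if tokens[i] == tokens[i-1] == "T":
--             res += 1
--     return res
-- ===== SOURCE B (Python) =====
-- def scorePoints(points, tokens: str) -> int:
--     base = 0 if tokens[0] == "E" else points[0]
--     n = len(points)
--     ts = tokens[:n]
--     base += sum(p for p, t in zip(points[1:], ts[1:]) if t == "T")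
--     total_t = ts.count("T")
--     runs = sum(1 for prev, c in zip("E" + ts, ts) if c == "T" and prev != "T")
--     return base + total_t - runs
-- ===== Notes on version B (the rewrite author's own statement) =====
-- stated objective: alternative
-- what changed: B replaces A's index loop with neighbour comparisons by the run identity: it truncates tokens to len(points), adds the T-weighted point sum via zip, and computes the consecutive-T bonus as count('T') minus the number of maximal T-run starts (found by zipping the token prefix against itself shifted by one).
import Mathlib
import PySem

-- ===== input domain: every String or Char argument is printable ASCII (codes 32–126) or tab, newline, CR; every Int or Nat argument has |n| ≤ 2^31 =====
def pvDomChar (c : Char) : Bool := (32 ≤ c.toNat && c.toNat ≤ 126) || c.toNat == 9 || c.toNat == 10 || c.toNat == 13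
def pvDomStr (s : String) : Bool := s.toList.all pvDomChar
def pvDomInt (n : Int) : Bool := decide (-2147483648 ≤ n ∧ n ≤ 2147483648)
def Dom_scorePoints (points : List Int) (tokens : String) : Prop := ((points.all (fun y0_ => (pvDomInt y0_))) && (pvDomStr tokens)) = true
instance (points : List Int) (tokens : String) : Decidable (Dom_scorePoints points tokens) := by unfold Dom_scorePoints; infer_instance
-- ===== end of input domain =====

-- B computes the consecutive-T bonus via the run identity (count of 'T' minus number of
-- T-run starts over the length-n token prefix) instead of A's per-index neighbour comparison.


-- ===== PORT A =====
def scorePoints (points : List Int) (tokens : String) : Int :=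
  let t := tokens.toList
  let res : Int := if PySem.List.pyGetD t 0 ' ' = 'E' then 0 else PySem.List.pyGetD points 0 0
  let n : Int := points.length
  (PySem.List.pyRange 1 n 1).foldl (fun res i =>
    let res := if PySem.List.pyGetD t i ' ' = 'T' then res + PySem.List.pyGetD points i 0 else res
    if PySem.List.pyGetD t i ' ' = PySem.List.pyGetD t (i - 1) ' ' ∧ PySem.List.pyGetD t (i - 1) ' ' = 'T'
      then res + 1 else res) res

-- ===== PORT B =====
def scorePoints_alt (points : List Int) (tokens : String) : Int :=
  let t := tokens.toList
  let base : Int := if PySem.List.pyGetD t 0 ' ' = 'E' then 0 else PySem.List.pyGetD points 0 0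
  let n : Int := points.length
  let ts := PySem.List.slice t none (some n)            -- tokens[:n]
  let base := base + ((PySem.List.slice points (some 1) none).zip (PySem.List.slice ts (some 1) none)).foldl
      (fun s pt => if pt.2 = 'T' then s + pt.1 else s) 0
  let totalT : Int := ts.count 'T'
  let runs : Int := (('E' :: ts).zip ts).foldl (fun s pc => if pc.2 = 'T' ∧ pc.1 ≠ 'T' then s + 1 else s) 0
  base + totalT - runs

-- ===== PRECONDITION & SPEC =====
-- Pre_ excludes exactly the inputs on which A raises: tokens empty (tokens[0] → IndexError),
-- points empty while tokens[0] ≠ 'E' (points[0] → IndexError), or tokens shorter than points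
-- (tokens[i] → IndexError in the loop).
def Pre_scorePoints (points : List Int) (tokens : String) : Prop :=
  1 ≤ tokens.toList.length ∧ points.length ≤ tokens.toList.length ∧
    (tokens.toList.headD ' ' = 'E' ∨ points ≠ [])
instance (points : List Int) (tokens : String) : Decidable (Pre_scorePoints points tokens) := by
  unfold Pre_scorePoints; infer_instance

def pvWitness_scorePoints : List Int × String := ([3, -2, 5, 7], "TTET")

def Spec_scorePoints (points : List Int) (tokens : String) (out : Int) : Prop := out = scorePoints_alt points tokens
instance (points : List Int) (tokens : String) (out : Int) : Decidable (Spec_scorePoints points tokens out) := by unfold Spec_scorePoints; infer_instance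

-- ===== CLAIM (what is proved, stated in full; the proofs are below) =====
def Claim_equal_scorePoints : Prop := ∀ (points : List Int) (tokens : String), Dom_scorePoints points tokens → Pre_scorePoints points tokens → Spec_scorePoints points tokens (scorePoints points tokens)

-- ===== LEMMAS AND PROOFS =====

-- per-index contribution of A's loop body: point if token is 'T', plus 1 for a TT pair
def pvFA (e : Int × Char × Char) : Int :=
  (if e.2.1 = 'T' then e.1 else 0) + (if e.2.1 = e.2.2 ∧ e.2.2 = 'T' then 1 else 0)

-- A's loop only reads tokens at indices 1..n-1 (and i-1 ≥ 0), so it may read the prefix t.take n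
theorem pvA_loop_take (t : List Char) (qs : List Int) (h : qs.length ≤ t.length) (r : Int) :
    (PySem.List.pyRange 1 (qs.length : Int) 1).foldl (fun res i =>
      let res := if PySem.List.pyGetD t i ' ' = 'T' then res + PySem.List.pyGetD qs i 0 else res
      if PySem.List.pyGetD t i ' ' = PySem.List.pyGetD t (i - 1) ' ' ∧ PySem.List.pyGetD t (i - 1) ' ' = 'T'
        then res + 1 else res) r
    = (PySem.List.pyRange 1 (qs.length : Int) 1).foldl (fun res i =>
      let res := if PySem.List.pyGetD (t.take qs.length) i ' ' = 'T' then res + PySem.List.pyGetD qs i 0 else res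
      if PySem.List.pyGetD (t.take qs.length) i ' ' = PySem.List.pyGetD (t.take qs.length) (i - 1) ' '
          ∧ PySem.List.pyGetD (t.take qs.length) (i - 1) ' ' = 'T'
        then res + 1 else res) r := by
  apply PySem.List.foldl_congr_mem
  intro acc i hi
  rw [PySem.List.mem_pyRange_one] at hi
  have hget : ∀ j : Int, 0 ≤ j → j < (qs.length : Int) →
      PySem.List.pyGetD (t.take qs.length) j ' ' = PySem.List.pyGetD t j ' ' := by
    intro j h0 hj
    rw [PySem.List.pyGetD_eq_getElem _ _ h0 (by simp; omega),
        PySem.List.pyGetD_eq_getElem _ _ h0 (by omega)]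
    · exact List.getElem_take
  rw [hget i (by omega) (by omega), hget (i - 1) (by omega) (by omega)]

-- positional → structural: A's index loop over 1..n-1 is a sum of pvFA over consecutive triples
theorem pvA_loop_sum (cs : List Char) (qs : List Int) (h : qs.length = cs.length) :
    ∀ (m : Nat), m ≤ qs.length → ∀ (r : Int),
    (PySem.List.pyRange 1 (m : Int) 1).foldl (fun res i =>
      let res := if PySem.List.pyGetD cs i ' ' = 'T' then res + PySem.List.pyGetD qs i 0 else res
      if PySem.List.pyGetD cs i ' ' = PySem.List.pyGetD cs (i - 1) ' ' ∧ PySem.List.pyGetD cs (i - 1) ' ' = 'T'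
        then res + 1 else res) r
    = r + ((((qs.drop 1).zip ((cs.drop 1).zip cs)).take (m - 1)).map pvFA).sum := by
  intro m
  induction m with
  | zero => intro _ r; rw [PySem.List.pyRange_one_eq_nil (by omega)]; simp
  | succ m ih =>
    intro hm r
    rcases Nat.eq_zero_or_pos m with hm0 | hmpos
    · subst hm0
      have hnil : PySem.List.pyRange 1 ((0 + 1 : Nat) : Int) 1 = [] :=
        PySem.List.pyRange_one_eq_nil (by norm_num)
      rw [hnil]
      simp
    · have hrange : PySem.List.pyRange 1 ((m + 1 : Nat) : Int) 1
          = PySem.List.pyRange 1 (m : Int) 1 ++ [(m : Int)] := by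
        push_cast
        exact PySem.List.pyRange_one_succ_right (by exact_mod_cast Nat.one_le_cast.mpr hmpos)
      rw [hrange, List.foldl_append, ih (by omega) r]
      have hz : ((qs.drop 1).zip ((cs.drop 1).zip cs)).length = qs.length - 1 := by
        simp [h]
      have hlt : m - 1 < ((qs.drop 1).zip ((cs.drop 1).zip cs)).length := by omega
      rw [show m + 1 - 1 = (m - 1) + 1 by omega,
          List.take_add_one, List.getElem?_eq_getElem hlt]
      simp only [List.foldl_cons, List.foldl_nil, List.map_append, List.sum_append]
      have e1 : PySem.List.pyGetD cs (m : Int) ' ' = cs[m]'(by omega) := by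
        rw [PySem.List.pyGetD_eq_getElem _ _ (by omega) (by omega)]; simp
      have e2 : PySem.List.pyGetD qs (m : Int) 0 = qs[m]'(by omega) := by
        rw [PySem.List.pyGetD_eq_getElem _ _ (by omega) (by omega)]; simp
      have e3 : PySem.List.pyGetD cs ((m : Int) - 1) ' ' = cs[m - 1]'(by omega) := by
        rw [show ((m : Int) - 1) = ((m - 1 : Nat) : Int) by omega,
            PySem.List.pyGetD_eq_getElem _ _ (by omega) (by omega)]
        simp
      have e4 : ((qs.drop 1).zip ((cs.drop 1).zip cs))[m - 1]'hlt
          = (qs[m]'(by omega), (cs[m]'(by omega), cs[m - 1]'(by omega))) := by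
        simp [List.getElem_zip]
        constructor <;> · congr 1; omega
      rw [e1, e2, e3, e4]
      simp [pvFA]
      split_ifs <;> ring
    
-- the run identity: summing pvFA over consecutive triples equals the T-weighted point sum
-- plus (count of 'T') minus (number of T-run starts), threading the previous char
theorem pvKey (cs : List Char) : ∀ (qs : List Int) (prev : Char), qs.length = cs.length →
    ((qs.zip (cs.zip (prev :: cs))).map pvFA).sum
    = ((qs.zip cs).map (fun pt => if pt.2 = 'T' then pt.1 else 0)).sum
      + (cs.count 'T' : Int)
      - (((prev :: cs).zip cs).countP (fun pc => decide (pc.2 = 'T' ∧ pc.1 ≠ 'T')) : Int) := by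
  induction cs with
  | nil => intro qs prev h; simp at h; simp [h]
  | cons c cs ih =>
    intro qs prev h
    cases qs with
    | nil => simp at h
    | cons q qs =>
      simp only [List.zip_cons_cons, List.map_cons, List.sum_cons, List.count_cons,
        List.countP_cons, pvFA]
      rw [ih qs c (by simpa using h)]
      push_cast
      by_cases hc : c = 'T' <;> by_cases hp : prev = 'T' <;>
        simp [hc, hp] <;> ring

-- ===== VERDICT (by name: the statement is the Claim_ definition above) =====
theorem scorePoints_spec : Claim_equal_scorePoints := by
  intro points tokens _ hpre
  obtain ⟨h1, h2, h3⟩ := hpre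
  unfold Spec_scorePoints scorePoints scorePoints_alt
  simp only []
  set t := tokens.toList with ht
  cases hpts : points with
  | nil =>
    subst hpts
    simp [PySem.List.pyRange_one_eq_nil, PySem.List.slice_to, PySem.List.slice_from_one]
  | cons p ps =>
    rw [← hpts]
    have hn1 : 1 ≤ points.length := by rw [hpts]; simp
    -- B's slices
    rw [show ((points.length : Int)) = ((points.length : Nat) : Int) by norm_num,
        PySem.List.slice_to_natCast, PySem.List.slice_from_one, PySem.List.slice_from_one]
    set ts := t.take points.length with hts
    have hlts : ts.length = points.length := by rw [hts]; simp; omega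
    -- A's loop reads only the prefix ts
    rw [pvA_loop_take t points h2]
    rw [← hts]
    -- A's loop as a sum of pvFA
    rw [pvA_loop_sum ts points hlts.symm points.length (le_refl _)]
    -- ts is nonempty: peel its head
    have htsne : ts ≠ [] := by
      intro hc; rw [hc] at hlts; simp at hlts; omega
    obtain ⟨c0, cs, hcons⟩ := List.exists_cons_of_ne_nil htsne
    have hcs : ts.tail = cs := by rw [hcons]; rfl
    have htail : ts.drop 1 = cs := by rw [hcons]; rfl
    have hzeq : (points.drop 1).zip ((ts.drop 1).zip ts)
        = (points.tail).zip (cs.zip (c0 :: cs)) := by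
      rw [htail, hcons, List.drop_one]
    rw [hzeq]
    -- B's folds as sums / counts
    rw [show ((points.tail).zip (ts.tail)).foldl (fun s pt => if pt.2 = 'T' then s + pt.1 else s) 0
        = ((points.tail).zip (ts.tail)).foldl (fun s pt => s + (if pt.2 = 'T' then pt.1 else 0)) 0 from
      PySem.List.foldl_congr_mem _ _ _ _ (by intro acc x _; split_ifs <;> simp)]
    rw [PySem.List.foldl_add (points.tail.zip ts.tail)
          (fun (pt : Int × Char) => if pt.2 = 'T' then pt.1 else 0) 0]
    rw [PySem.List.foldl_ite_add_one (fun (pc : Char × Char) => pc.2 = 'T' ∧ pc.1 ≠ 'T')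
          (('E' :: ts).zip ts) 0]
    have hcslen : cs.length = points.length - 1 := by
      have := hlts; rw [hcons] at this; simp at this; omega
    have htake : List.take (points.length - 1) (points.tail.zip (cs.zip (c0 :: cs)))
        = points.tail.zip (cs.zip (c0 :: cs)) := by
      apply List.take_of_length_le
      simp [hcslen]
    rw [htake]
    -- run identity
    rw [pvKey cs points.tail c0 (by
      have : points.tail.length = points.length - 1 := by simp
      rw [this]
      have : cs.length = ts.length - 1 := by rw [hcons]; simp
      omega)]
    rw [hcs, hcons]
    simp [List.count_cons, List.countP_cons]
    by_cases hc : c0 = 'T' <;> simp [hc] <;> ring
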